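-- pv_equiv track=rewrite | github.com/qualitymaterial/Stratum-Sports | backend/app/tools/backfill_history.py | _redact_api_key
-- ===== SOURCE A (Python) =====
-- def _redact_api_key(text: str, api_key: str | None) -> str:
--     if not text:
--         return text
--     redacted = text
--     if api_key:
--         redacted = redacted.replace(api_key, "***REDACTED***")
--     for token in ("apiKey=", "api_key="):
--         if token in redacted:
--             marker = redacted.split(token, 1)
--             head = marker[0]
--             tail = marker[1]
--             if "&" in tail:
--                 tail = "***REDACTED***&" + tail.split("&", 1)[1]
--             else:
--                 tail = "***REDACTED***"
--             redacted = head + token + tail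
--     return redacted
-- ===== SOURCE B (Python) =====
-- REDACTED = "***REDACTED***"
--
--
-- def _replace_all(s, old):
--     # left-to-right non-overlapping scan, like str.replace
--     out = []
--     i = 0
--     while i < len(s):
--         if s.startswith(old, i):
--             out.append(REDACTED)
--             i += len(old)
--         else:
--             out.append(s[i])
--             i += 1
--     return "".join(out)
--
--
-- def _redact_token(s, token):
--     # single forward scan; at the first token occurrence blank the value
--     # (chars up to the next '&' or the end) and stop scanning
--     out = []
--     i = 0
--     n = len(s)
--     while i < n:
--         if s.startswith(token, i):
--             out.append(token)
--             out.append(REDACTED)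
--             i += len(token)
--             while i < n and s[i] != "&":
--                 i += 1
--             out.append(s[i:])
--             return "".join(out)
--         out.append(s[i])
--         i += 1
--     return "".join(out)
--
--
-- def _redact_api_key(text, api_key):
--     if not text:
--         return text
--     out = text
--     if api_key:
--         out = _replace_all(out, api_key)
--     out = _redact_token(out, "apiKey=")
--     return _redact_token(out, "api_key=")
-- ===== Notes on version B (the rewrite author's own statement) =====
-- stated objective: alternative
-- what changed: Replaces A's library split-and-rejoin (str.replace, split(token,1), split('&',1), concatenation) with hand-rolled single-forward-scan automata over characters: one accumulator loop does the key replacement, and one accumulator loop per marker walks the string, and at the first marker occurrence emits the redaction, skips characters up to the next '&', and stops.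
import Mathlib
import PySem

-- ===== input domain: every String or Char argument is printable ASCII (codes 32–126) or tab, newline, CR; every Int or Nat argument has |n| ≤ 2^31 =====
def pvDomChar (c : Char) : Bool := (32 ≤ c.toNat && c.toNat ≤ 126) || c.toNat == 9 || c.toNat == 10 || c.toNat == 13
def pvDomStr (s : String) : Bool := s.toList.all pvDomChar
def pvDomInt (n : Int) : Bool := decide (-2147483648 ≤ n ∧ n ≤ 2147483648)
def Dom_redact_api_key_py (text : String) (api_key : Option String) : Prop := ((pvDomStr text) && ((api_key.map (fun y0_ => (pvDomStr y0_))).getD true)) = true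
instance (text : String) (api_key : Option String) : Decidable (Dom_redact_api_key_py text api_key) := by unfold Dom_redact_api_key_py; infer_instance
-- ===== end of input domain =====

-- B replaces A's library split-and-rejoin with single-forward-scan accumulator automata
-- over the characters (alternative decomposition; same cost).

-- ===== PORT A =====
-- loop body of 'for token in ("apiKey=", "api_key=")': split-and-rejoin
def redactTokA (redacted tok : String) : String :=
  if PySem.Str.isIn tok redacted then
    let marker := (PySem.Str.splitMax? redacted tok 1).getD []
    let head := (PySem.List.pyGet? marker 0).getD ""
    let tail := (PySem.List.pyGet? marker 1).getD ""
    let tail2 :=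
      if PySem.Str.isIn "&" tail then
        "***REDACTED***&" ++ ((PySem.List.pyGet? ((PySem.Str.splitMax? tail "&" 1).getD []) 1).getD "")
      else "***REDACTED***"
    head ++ tok ++ tail2
  else redacted

def redact_api_key_py (text : String) (api_key : Option String) : String :=
  if text == "" then text
  else
    let redacted := text
    let redacted :=
      match api_key with
      | none => redacted
      | some k => if k == "" then redacted else PySem.Str.replace redacted k "***REDACTED***"
    let redacted := redactTokA redacted "apiKey="
    redactTokA redacted "api_key="

-- ===== PORT B =====
def pvRED : List Char := "***REDACTED***".toList

-- Source B _replace_all: forward scan with an accumulator, emit REDACTED at each match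
def repGo (old : List Char) (l acc : List Char) : List Char :=
  match l with
  | [] => acc.reverse
  | c :: t =>
    if old.isPrefixOf (c :: t) then repGo old (t.drop (old.length - 1)) (pvRED.reverse ++ acc)
    else repGo old t (c :: acc)
termination_by l.length
decreasing_by
  · simp only [List.length_drop, List.length_cons]; omega
  · simp

-- Source B inner while: skip characters up to the next '&' (kept) or the end
def skipAmp : List Char → List Char
  | [] => []
  | c :: t => if c = '&' then c :: t else skipAmp t

-- Source B _redact_token: forward scan; at the first token match emit the redaction and stop
def redactTokB (tok : List Char) (l acc : List Char) : List Char :=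
  match l with
  | [] => acc.reverse
  | c :: t =>
    if tok.isPrefixOf (c :: t) then
      acc.reverse ++ tok ++ pvRED ++ skipAmp (t.drop (tok.length - 1))
    else redactTokB tok t (c :: acc)

def redact_api_key_py_alt (text : String) (api_key : Option String) : String :=
  if text == "" then text
  else
    let out := text.toList
    let out :=
      match api_key with
      | none => out
      | some k => if k == "" then out else repGo k.toList out []
    String.ofList (redactTokB "api_key=".toList (redactTokB "apiKey=".toList out []) [])

-- ===== PRECONDITION & SPEC =====
def Spec_redact_api_key_py (text : String) (api_key : Option String) (out : String) : Prop := out = redact_api_key_py_alt text api_key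
instance (text : String) (api_key : Option String) (out : String) : Decidable (Spec_redact_api_key_py text api_key out) := by unfold Spec_redact_api_key_py; infer_instance

-- ===== CLAIM (what is proved, stated in full; the proofs are below) =====
def Claim_equal_redact_api_key_py : Prop := ∀ (text : String) (api_key : Option String), Dom_redact_api_key_py text api_key → Spec_redact_api_key_py text api_key (redact_api_key_py text api_key)

-- ===== LEMMAS AND PROOFS =====

theorem str_ext {a b : String} (h : a.toList = b.toList) : a = b := by
  rw [← @String.ofList_toList a, ← @String.ofList_toList b, h]

theorem go_zero (sep : List Char) (fuel : Nat) (l cur : List Char) (acc : List (List Char)) :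
    PySem.Chars.splitOnMax.go sep fuel 0 l cur acc = acc.reverse ++ [cur.reverse ++ l] := by
  cases fuel with
  | zero => simp [PySem.Chars.splitOnMax.go]
  | succ f => cases l with
    | nil => simp [PySem.Chars.splitOnMax.go]
    | cons c rest => simp [PySem.Chars.splitOnMax.go]

theorem go_one_found (sep : List Char) (hsep : sep ≠ []) :
    ∀ (i : Nat) (l : List Char) (fuel : Nat) (cur : List Char) (acc : List (List Char)),
    l.length < fuel →
    sep <+: l.drop i → (∀ k < i, ¬ sep <+: l.drop k) →
    PySem.Chars.splitOnMax.go sep fuel 1 l cur acc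
      = acc.reverse ++ [cur.reverse ++ l.take i, l.drop (i + sep.length)] := by
  intro i
  induction i with
  | zero =>
    intro l fuel cur acc hfuel hocc _
    cases l with
    | nil =>
      exfalso; exact hsep (List.prefix_nil.mp (by simpa using hocc))
    | cons c rest =>
      cases fuel with
      | zero => omega
      | succ f =>
        simp only [PySem.Chars.splitOnMax.go]
        rw [if_neg (by omega), if_pos (by simpa [List.isPrefixOf_iff_prefix] using hocc)]
        rw [go_zero]
        simp
  | succ i ih =>
    intro l fuel cur acc hfuel hocc hmin
    cases l with
    | nil => exact absurd (List.prefix_nil.mp (by simpa using hocc)) hsep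
    | cons c rest =>
      cases fuel with
      | zero => omega
      | succ f =>
        have h0 : ¬ sep <+: (c :: rest) := by simpa using hmin 0 (by omega)
        simp only [PySem.Chars.splitOnMax.go]
        rw [if_neg (by omega), if_neg (by simpa [List.isPrefixOf_iff_prefix] using h0)]
        rw [ih rest f (c :: cur) acc (by simpa using Nat.lt_of_succ_lt_succ hfuel)
          (by simpa using hocc) (fun k hk => by simpa using hmin (k+1) (by omega))]
        simp [List.drop_succ_cons, Nat.add_right_comm i 1 sep.length]

theorem splitOnMax_one_found (cs ct : List Char) (hct : ct ≠ [])
    (hf : PySem.Chars.find cs ct ≠ -1) :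
    PySem.Chars.splitOnMax cs ct 1
      = [cs.take (PySem.Chars.find cs ct).toNat,
         cs.drop ((PySem.Chars.find cs ct).toNat + ct.length)] := by
  have hnn : 0 ≤ PySem.Chars.find cs ct := by
    rw [PySem.Chars.find_nonneg_iff]
    exact (PySem.Chars.find_ne_neg_one_iff cs ct).mp hf
  obtain ⟨hocc, hmin⟩ := PySem.Chars.find_spec hnn
  unfold PySem.Chars.splitOnMax
  rw [if_neg (by omega)]
  norm_num
  rw [go_one_found ct hct (PySem.Chars.find cs ct).toNat cs (cs.length + 1) [] []
    (by omega) hocc hmin]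
  simp

theorem pyGet_two_0 (a b : String) : (PySem.List.pyGet? [a, b] (0 : Int)).getD "" = a := by
  simp [PySem.List.pyGet?, PySem.List.pyIdx?]

theorem pyGet_two_1 (a b : String) : (PySem.List.pyGet? [a, b] (1 : Int)).getD "" = b := by
  simp [PySem.List.pyGet?, PySem.List.pyIdx?]

-- no occurrence of tok anywhere in l: the scan copies l
theorem tokB_no_occ (tok : List Char) :
    ∀ (l acc : List Char), (∀ k, ¬ tok <+: l.drop k) →
    redactTokB tok l acc = acc.reverse ++ l := by
  intro l
  induction l with
  | nil => intro acc _; simp [redactTokB]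
  | cons c t ih =>
    intro acc hno
    rw [redactTokB]
    rw [if_neg (by simpa [List.isPrefixOf_iff_prefix] using hno 0)]
    rw [ih (c :: acc) (fun k => by simpa using hno (k + 1))]
    simp

-- first occurrence of tok at position i: the scan stops there
theorem tokB_found (tok : List Char) (htok : tok ≠ []) :
    ∀ (i : Nat) (l acc : List Char),
    tok <+: l.drop i → (∀ k < i, ¬ tok <+: l.drop k) →
    redactTokB tok l acc
      = acc.reverse ++ l.take i ++ tok ++ pvRED ++ skipAmp (l.drop (i + tok.length)) := by
  intro i
  induction i with
  | zero =>
    intro l acc hocc _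
    cases l with
    | nil => exact absurd (List.prefix_nil.mp (by simpa using hocc)) htok
    | cons c t =>
      rw [redactTokB, if_pos (by simpa [List.isPrefixOf_iff_prefix] using hocc)]
      cases tok with
      | nil => exact absurd rfl htok
      | cons o os => simp [List.drop_succ_cons]
  | succ i ih =>
    intro l acc hocc hmin
    cases l with
    | nil => exact absurd (List.prefix_nil.mp (by simpa using hocc)) htok
    | cons c t =>
      rw [redactTokB]
      rw [if_neg (by simpa [List.isPrefixOf_iff_prefix] using hmin 0 (by omega))]
      rw [ih t (c :: acc) (by simpa using hocc)
        (fun k hk => by simpa using hmin (k + 1) (by omega))]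
      simp [List.drop_succ_cons, Nat.add_right_comm i 1 tok.length]

theorem skipAmp_of_not_mem : ∀ (t : List Char), '&' ∉ t → skipAmp t = [] := by
  intro t
  induction t with
  | nil => intro _; rfl
  | cons c r ih =>
    intro h
    rw [skipAmp, if_neg (by simp at h; exact fun hc => h.1 hc.symm)]
    exact ih (by simp at h; exact h.2)

theorem skipAmp_found :
    ∀ (j : Nat) (t : List Char),
    ['&'] <+: t.drop j → (∀ k < j, ¬ ['&'] <+: t.drop k) →
    skipAmp t = t.drop j := by
  intro j
  induction j with
  | zero =>
    intro t hocc _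
    obtain ⟨r, hr⟩ := hocc
    simp only [List.drop_zero] at hr
    rw [← hr]
    simp [skipAmp]
  | succ j ih =>
    intro t hocc hmin
    cases t with
    | nil => simp at hocc
    | cons c r =>
      have h0 : ¬ ['&'] <+: (c :: r) := hmin 0 (by omega)
      have hc : c ≠ '&' := by
        intro hc; exact h0 ⟨r, by rw [hc]; rfl⟩
      simp only [skipAmp, if_neg hc, List.drop_succ_cons]
      exact ih r (by simpa using hocc) (fun k hk => by simpa using hmin (k + 1) (by omega))

theorem mem_singleton_infix {a : Char} {l : List Char} (h : a ∈ l) : [a] <:+: l := by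
  obtain ⟨s, t, rfl⟩ := List.append_of_mem h
  exact ⟨s, t, by simp⟩

theorem prefix_drop_infix {sub l : List Char} {k : Nat} (h : sub <+: l.drop k) : sub <:+: l :=
  h.isInfix.trans (List.drop_suffix k l).isInfix

-- A's split-and-rejoin pass equals B's scanning pass, character-wise
theorem tokA_eq_tokB (s tok : String) (htok : tok.toList ≠ []) :
    (redactTokA s tok).toList = redactTokB tok.toList s.toList [] := by
  unfold redactTokA
  by_cases hf : PySem.Chars.find s.toList tok.toList = -1
  · rw [if_neg (by simp [PySem.Str.isIn_eq, PySem.Chars.isIn, hf])]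
    have hno : ∀ k, ¬ tok.toList <+: s.toList.drop k := by
      intro k hk
      exact ((PySem.Chars.find_ne_neg_one_iff s.toList tok.toList).mpr
        (prefix_drop_infix hk)) hf
    rw [tokB_no_occ tok.toList s.toList [] hno]
    simp
  · have hnn : 0 ≤ PySem.Chars.find s.toList tok.toList := by
      rw [PySem.Chars.find_nonneg_iff]; exact (PySem.Chars.find_ne_neg_one_iff _ _).mp hf
    obtain ⟨hocc, hmin⟩ := PySem.Chars.find_spec hnn
    rw [if_pos (by simp [PySem.Str.isIn_eq, PySem.Chars.isIn, hf])]
    have hsplit : PySem.Str.splitMax? s tok 1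
        = some [String.ofList (s.toList.take (PySem.Chars.find s.toList tok.toList).toNat),
                String.ofList (s.toList.drop ((PySem.Chars.find s.toList tok.toList).toNat + tok.length))] := by
      simp [PySem.Str.splitMax?, PySem.Chars.splitMax?, List.isEmpty_iff, htok,
        splitOnMax_one_found s.toList tok.toList htok hf, String.length_toList]
    have hlen : tok.toList.length = tok.length := by simp
    rw [tokB_found tok.toList htok (PySem.Chars.find s.toList tok.toList).toNat s.toList [] hocc hmin]
    simp only [hsplit, Option.getD_some, pyGet_two_0, pyGet_two_1, hlen]
    by_cases hamp : PySem.Chars.find (s.toList.drop ((PySem.Chars.find s.toList tok.toList).toNat + tok.length)) ['&'] = -1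
    · rw [if_neg (by
        simp only [PySem.Str.isIn_eq, PySem.Chars.isIn, String.toList_ofList]
        simp [show ("&".toList : List Char) = ['&'] from rfl, hamp])]
      have hmem : '&' ∉ s.toList.drop ((PySem.Chars.find s.toList tok.toList).toNat + tok.length) := by
        intro hm
        exact ((PySem.Chars.find_ne_neg_one_iff _ ['&']).mpr
          (mem_singleton_infix hm)) hamp
      rw [skipAmp_of_not_mem _ hmem]
      simp [pvRED]
    · rw [if_pos (by
        simp only [PySem.Str.isIn_eq, PySem.Chars.isIn, String.toList_ofList]
        simp [show ("&".toList : List Char) = ['&'] from rfl, hamp])]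
      have hann : 0 ≤ PySem.Chars.find (s.toList.drop ((PySem.Chars.find s.toList tok.toList).toNat + tok.length)) ['&'] := by
        rw [PySem.Chars.find_nonneg_iff]; exact (PySem.Chars.find_ne_neg_one_iff _ _).mp hamp
      obtain ⟨hocc2, hmin2⟩ := PySem.Chars.find_spec hann
      have hsplit2 : PySem.Str.splitMax? (String.ofList (s.toList.drop ((PySem.Chars.find s.toList tok.toList).toNat + tok.length))) "&" 1
          = some [String.ofList ((s.toList.drop ((PySem.Chars.find s.toList tok.toList).toNat + tok.length)).take (PySem.Chars.find (s.toList.drop ((PySem.Chars.find s.toList tok.toList).toNat + tok.length)) ['&']).toNat),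
                  String.ofList ((s.toList.drop ((PySem.Chars.find s.toList tok.toList).toNat + tok.length)).drop ((PySem.Chars.find (s.toList.drop ((PySem.Chars.find s.toList tok.toList).toNat + tok.length)) ['&']).toNat + 1))] := by
        simp [PySem.Str.splitMax?, PySem.Chars.splitMax?, show ("&".toList : List Char) = ['&'] from rfl,
          splitOnMax_one_found (s.toList.drop ((PySem.Chars.find s.toList tok.toList).toNat + tok.length)) ['&'] (by decide) hamp]
      have hskip : skipAmp (s.toList.drop ((PySem.Chars.find s.toList tok.toList).toNat + tok.length))
          = '&' :: (s.toList.drop ((PySem.Chars.find s.toList tok.toList).toNat + tok.length)).drop ((PySem.Chars.find (s.toList.drop ((PySem.Chars.find s.toList tok.toList).toNat + tok.length)) ['&']).toNat + 1) := by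
        rw [skipAmp_found _ _ hocc2 hmin2]
        obtain ⟨t2, ht2⟩ := hocc2
        rw [← ht2]
        rw [show ∀ (D : List Char) (n : Nat), D.drop (n+1) = (D.drop n).drop 1 from fun D n => by rw [List.drop_drop, Nat.add_comm], ← ht2]
        rfl
      rw [hsplit2]
      simp only [Option.getD_some, pyGet_two_1, hskip]
      simp [pvRED, show ("***REDACTED***&".toList : List Char) = pvRED ++ ['&'] from rfl]

-- A's str.replace equals B's scanning replacement, character-wise
theorem rep_eq (old : List Char) (hold : old ≠ []) :
    ∀ (fuel : Nat) (l acc : List Char), l.length ≤ fuel →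
    PySem.Chars.replace.go old pvRED fuel l acc = repGo old l acc := by
  intro fuel
  induction fuel with
  | zero =>
    intro l acc hle
    have : l = [] := List.length_eq_zero_iff.mp (by omega)
    subst this
    simp [PySem.Chars.replace.go, repGo]
  | succ f ih =>
    intro l acc hle
    cases l with
    | nil => simp [PySem.Chars.replace.go, repGo]
    | cons c t =>
      rw [PySem.Chars.replace.go, repGo]
      by_cases hp : old.isPrefixOf (c :: t)
      · rw [if_pos hp, if_pos hp]
        cases old with
        | nil => exact absurd rfl hold
        | cons o os =>
          simp only [List.length_cons, List.drop_succ_cons, Nat.add_sub_cancel]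
          exact ih (t.drop os.length) (pvRED.reverse ++ acc)
            (by simp only [List.length_drop]; simp at hle; omega)
      · rw [if_neg hp, if_neg hp]
        exact ih t (c :: acc) (by simp at hle; omega)

theorem replace_eq_repGo (s k : String) (hk : k.toList ≠ []) :
    (PySem.Str.replace s k "***REDACTED***").toList = repGo k.toList s.toList [] := by
  unfold PySem.Str.replace PySem.Chars.replace
  rw [if_neg (by simp [List.isEmpty_iff, hk])]
  rw [String.toList_ofList]
  exact rep_eq k.toList hk s.toList.length s.toList [] le_rfl

theorem toList_ne_nil_of_ne_empty {k : String} (hk : ¬ (k == "") = true) : k.toList ≠ [] := by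
  intro h
  exact hk (by simp [str_ext (show k.toList = "".toList from by rw [h]; rfl)])

-- ===== VERDICT (by name: the statement is the Claim_ definition above) =====
theorem redact_api_key_py_spec : Claim_equal_redact_api_key_py := by
  intro text api_key _
  unfold Spec_redact_api_key_py redact_api_key_py redact_api_key_py_alt
  by_cases h : text == ""
  · simp [h]
  · simp only [h, Bool.false_eq_true, if_false]
    cases api_key with
    | none =>
      apply str_ext
      rw [String.toList_ofList, tokA_eq_tokB _ "api_key=" (by decide),
        tokA_eq_tokB _ "apiKey=" (by decide)]
    | some k =>
      by_cases hk : k == ""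
      · apply str_ext
        simp only [hk, if_true]
        rw [String.toList_ofList, tokA_eq_tokB _ "api_key=" (by decide),
          tokA_eq_tokB _ "apiKey=" (by decide)]
      · apply str_ext
        simp only [hk, Bool.false_eq_true, if_false]
        rw [String.toList_ofList, tokA_eq_tokB _ "api_key=" (by decide),
          tokA_eq_tokB _ "apiKey=" (by decide),
          replace_eq_repGo text k (toList_ne_nil_of_ne_empty hk)]
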